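-- pv_equiv track=rewrite | github.com/sycomix/Synthesis.Pro | Synthesis.Pro/Utilities/detective_mode.py | group_similar_errors
-- ===== SOURCE A (Python) =====
-- from typing import Dict, List, Optional
--
-- def group_similar_errors(errors: List[Dict]) -> Dict[str, List[Dict]]:
--     """
--     Group similar errors together for batch processing.
--
--     Args:
--         errors: List of error dicts
--
--     Returns:
--         Dict mapping group keys to lists of errors
--     """
--     groups = {}
--     for error in errors:
--         # Group by error type and file path
--         error_type = error.get('type', 'Unknown')
--         file_path = error.get('file_path', 'Unknown')
--         group_key = f"{error_type}:{file_path}"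
--
--         if group_key not in groups:
--             groups[group_key] = []
--         groups[group_key].append(error)
--
--     return groups
-- ===== SOURCE B (Python) =====
-- from typing import Dict, List
--
-- def _group_key(error: Dict) -> str:
--     return f"{error.get('type', 'Unknown')}:{error.get('file_path', 'Unknown')}"
--
-- def group_similar_errors(errors: List[Dict]) -> Dict[str, List[Dict]]:
--     keys = list(dict.fromkeys(map(_group_key, errors)))
--     return {k: [e for e in errors if _group_key(e) == k] for k in keys}
-- ===== Notes on version B (the rewrite author's own statement) =====
-- stated objective: alternative
-- what changed: Replaces A's single-pass dict-membership accumulation with a two-pass scheme: dedup the computed group keys in first-occurrence order (dict.fromkeys), then build each group by filtering the error list per key.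
import Mathlib
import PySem

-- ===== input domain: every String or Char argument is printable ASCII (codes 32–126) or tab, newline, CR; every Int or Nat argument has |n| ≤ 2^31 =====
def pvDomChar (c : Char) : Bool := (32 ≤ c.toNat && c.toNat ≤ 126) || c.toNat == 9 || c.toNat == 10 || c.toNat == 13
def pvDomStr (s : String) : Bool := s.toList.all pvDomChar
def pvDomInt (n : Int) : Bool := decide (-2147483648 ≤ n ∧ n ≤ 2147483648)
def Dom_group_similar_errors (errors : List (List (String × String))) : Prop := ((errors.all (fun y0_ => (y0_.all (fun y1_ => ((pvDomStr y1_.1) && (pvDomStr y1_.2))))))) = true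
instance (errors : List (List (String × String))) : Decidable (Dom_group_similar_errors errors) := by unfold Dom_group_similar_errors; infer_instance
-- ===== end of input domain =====

-- B replaces A's single-pass dict-membership accumulation by a two-pass ordered-dedup of group keys
-- followed by one filter per key (objective: alternative decomposition, same return value).

-- ===== PORT A =====
-- A: one pass; if the key is new, seed it with [], then append the error to its group.
def group_similar_errors (errors : List (List (String × String))) : List (String × List (List (String × String))) :=
  (errors.foldl
    (fun groups error =>
      let error_type := (PySem.Dict.mk error).getD "type" "Unknown"
      let file_path := (PySem.Dict.mk error).getD "file_path" "Unknown"
      let group_key := error_type ++ ":" ++ file_path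
      let groups := if groups.contains group_key = false then groups.insert group_key [] else groups
      groups.modify group_key [] (fun l => l ++ [error]))
    PySem.Dict.empty).items

-- ===== PORT B =====
def pvGroupKey (error : List (String × String)) : String :=
  (PySem.Dict.mk error).getD "type" "Unknown" ++ ":" ++ (PySem.Dict.mk error).getD "file_path" "Unknown"

-- B: ordered dedup of the keys (dict.fromkeys), then one filter pass per key.
def group_similar_errors_alt (errors : List (List (String × String))) : List (String × List (List (String × String))) :=
  (PySem.List.dedup (errors.map pvGroupKey)).map
    (fun k => (k, errors.filter (fun e => pvGroupKey e == k)))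

-- ===== PRECONDITION & SPEC =====
def Spec_group_similar_errors (errors : List (List (String × String))) (out : List (String × List (List (String × String)))) : Prop := out = group_similar_errors_alt errors
instance (errors : List (List (String × String))) (out : List (String × List (List (String × String)))) : Decidable (Spec_group_similar_errors errors out) := by unfold Spec_group_similar_errors; infer_instance

-- ===== CLAIM (what is proved, stated in full; the proofs are below) =====
def Claim_equal_group_similar_errors : Prop := ∀ (errors : List (List (String × String))), Dom_group_similar_errors errors → Spec_group_similar_errors errors (group_similar_errors errors)

-- ===== LEMMAS AND PROOFS =====

-- A's composite step (seed-if-new, then append) is pointwise the plain modify-append step.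
theorem pv_stepA_eq (d : PySem.Dict String (List (List (String × String)))) (k : String)
    (e : List (String × String)) :
    (if d.contains k = false then d.insert k [] else d).modify k [] (fun l => l ++ [e])
      = d.modify k [] (fun l => l ++ [e]) := by
  by_cases h : d.contains k = false
  · simp only [h, if_pos, PySem.Dict.modify, PySem.Dict.getD_insert_self,
      PySem.Dict.insert_insert_self, PySem.Dict.getD_of_not_contains d [] h]
  · simp [h]

-- A's fold, rewritten step by step to the plain modify fold.
theorem pv_fold_eq (errors : List (List (String × String))) :
    group_similar_errors errors
      = ((errors.foldl
          (fun d e => d.modify (pvGroupKey e) [] (fun l => l ++ [e]))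
          PySem.Dict.empty).items) := by
  unfold group_similar_errors
  congr 2
  funext d e
  exact pv_stepA_eq d (pvGroupKey e) e

-- ===== VERDICT (by name: the statement is the Claim_ definition above) =====
theorem group_similar_errors_spec : Claim_equal_group_similar_errors := by
  intro errors _
  unfold Spec_group_similar_errors group_similar_errors_alt
  rw [pv_fold_eq]
  set d := errors.foldl (fun d e => d.modify (pvGroupKey e) [] (fun l => l ++ [e]))
      PySem.Dict.empty with hd
  have hnd : d.keys.Nodup := by
    rw [hd]
    exact PySem.Dict.nodup_keys_foldl_modify_key errors pvGroupKey [] _ _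
      (by simp)
  have hkeys : d.keys = PySem.List.dedup (errors.map pvGroupKey) := by
    rw [hd, PySem.Dict.keys_foldl_modify_key]
    simp [PySem.List.dedup, PySem.Set.update, PySem.Set.ofList, PySem.Dict.keys_empty]
  have hgetD : ∀ k, d.getD k [] = errors.filter (fun e => pvGroupKey e == k) := by
    intro k
    rw [hd]
    have := PySem.Dict.getD_foldl_modify_append
      (errors.map (fun e => (pvGroupKey e, e))) (PySem.Dict.empty) k
    rw [List.foldl_map] at this
    simp only [this, PySem.Dict.getD_empty, List.nil_append, List.filter_map]
    simp [List.map_map, Function.comp_def]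
  rw [PySem.Dict.items_eq_map_keys d hnd [], hkeys]
  exact List.map_congr_left (fun k _ => by rw [hgetD k])
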